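-- pv_equiv track=rewrite | github.com/Brown-CSCI0111/brown-csci0111.github.io | assets/lectures/36/lec36_bigO.py | distinct2
-- ===== SOURCE A (Python) =====
-- def distinct2(my_list: list):
--     "return list of unique items in the list"
--     if len(my_list) == 0: return []
--     else:
--         first = my_list[0]
--         rest = my_list[1:]
--         if first in rest:
--             return distinct2(rest)
--         else:
--             return [first] + distinct2(rest)
-- ===== SOURCE B (Python) =====
-- def distinct2(my_list: list):
--     "return list of unique items in the list"
--     seen = set()
--     out = []
--     for item in reversed(my_list):
--         if item not in seen:
--             seen.add(item)
--             out.append(item)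
--     out.reverse()
--     return out
-- ===== Notes on version B (the rewrite author's own statement) =====
-- stated objective: faster
-- what changed: Replaced the quadratic recursion with an 'is the head in the rest' scan at every step by a single right-to-left pass over the list with a hash set of seen items, collecting last occurrences and reversing the result once.
import Mathlib
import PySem

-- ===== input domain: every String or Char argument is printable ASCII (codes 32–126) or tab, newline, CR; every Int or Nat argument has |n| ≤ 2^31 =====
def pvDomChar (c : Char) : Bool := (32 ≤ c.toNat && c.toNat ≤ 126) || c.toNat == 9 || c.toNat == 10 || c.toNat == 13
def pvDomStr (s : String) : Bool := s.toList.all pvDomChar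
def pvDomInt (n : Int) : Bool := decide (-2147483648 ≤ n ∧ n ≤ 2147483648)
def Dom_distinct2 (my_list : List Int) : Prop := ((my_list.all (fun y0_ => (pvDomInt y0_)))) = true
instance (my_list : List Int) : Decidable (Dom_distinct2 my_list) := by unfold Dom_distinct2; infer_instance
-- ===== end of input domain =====

-- B replaces A's quadratic head-in-rest recursion by one right-to-left pass with a seen set (asymptotically faster).

-- ===== PORT A =====
def distinct2 (my_list : List Int) : List Int :=
  match my_list with
  | [] => []
  | first :: rest =>
    if first ∈ rest then distinct2 rest
    else first :: distinct2 rest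

-- ===== PORT B =====
-- the 'for item in reversed(my_list)' loop, carrying (seen, out)
def distinct2Loop : List Int → PySem.Set Int → List Int → List Int
  | [], _, out => out
  | item :: rest, seen, out =>
    if PySem.Set.contains seen item then distinct2Loop rest seen out
    else distinct2Loop rest (PySem.Set.add seen item) (out ++ [item])

def distinct2_alt (my_list : List Int) : List Int :=
  (distinct2Loop my_list.reverse PySem.Set.empty []).reverse

-- ===== PRECONDITION & SPEC =====
def Spec_distinct2 (my_list : List Int) (out : List Int) : Prop := out = distinct2_alt my_list
instance (my_list : List Int) (out : List Int) : Decidable (Spec_distinct2 my_list out) := by unfold Spec_distinct2; infer_instance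

-- ===== CLAIM (what is proved, stated in full; the proofs are below) =====
def Claim_equal_distinct2 : Prop := ∀ (my_list : List Int), Dom_distinct2 my_list → Spec_distinct2 my_list (distinct2 my_list)

-- ===== LEMMAS AND PROOFS =====

theorem set_contains_true (s : PySem.Set Int) (y : Int) (h : y ∈ s) :
    PySem.Set.contains s y = true := by
  simpa [PySem.Set.contains, List.contains_iff_mem] using h

theorem set_contains_false (s : PySem.Set Int) (y : Int) (h : y ∉ s) :
    PySem.Set.contains s y = false := by
  simpa [PySem.Set.contains, List.contains_iff_mem] using h

theorem distinct2Loop_acc (l : List Int) (seen : PySem.Set Int) (out : List Int) :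
    distinct2Loop l seen out = out ++ distinct2Loop l seen [] := by
  induction l generalizing seen out with
  | nil => simp [distinct2Loop]
  | cons x xs ih =>
    by_cases h : x ∈ seen
    · rw [distinct2Loop, distinct2Loop, set_contains_true seen x h, if_pos rfl, if_pos rfl,
        ih seen out]
    · rw [distinct2Loop, distinct2Loop, set_contains_false seen x h]
      simp only [Bool.false_eq_true, if_false, List.nil_append]
      rw [ih (PySem.Set.add seen x) (out ++ [x]), ih (PySem.Set.add seen x) [x],
        List.append_assoc]

theorem distinct2Loop_append_single (ys : List Int) (x : Int) (seen : PySem.Set Int) :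
    distinct2Loop (ys ++ [x]) seen [] =
      distinct2Loop ys seen [] ++ (if x ∈ seen ∨ x ∈ ys then [] else [x]) := by
  induction ys generalizing seen with
  | nil =>
    by_cases h : x ∈ seen
    · simp [distinct2Loop, h]
    · simp [distinct2Loop, h]
  | cons y ys ih =>
    rw [List.cons_append, distinct2Loop, distinct2Loop]
    by_cases h : y ∈ seen
    · have hiff : (x ∈ seen ∨ x ∈ y :: ys) ↔ (x ∈ seen ∨ x ∈ ys) := by
        rw [List.mem_cons]
        constructor
        · rintro (hs | rfl | hm)
          · exact Or.inl hs
          · exact Or.inl h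
          · exact Or.inr hm
        · tauto
      rw [set_contains_true seen y h, if_pos rfl, if_pos rfl, ih seen, if_congr hiff rfl rfl]
    · have hiff : (x ∈ PySem.Set.add seen y ∨ x ∈ ys) ↔ (x ∈ seen ∨ x ∈ y :: ys) := by
        rw [PySem.Set.mem_add, List.mem_cons]
        tauto
      rw [set_contains_false seen y h]
      simp only [Bool.false_eq_true, if_false, List.nil_append]
      rw [distinct2Loop_acc (ys ++ [x]) _ [y], distinct2Loop_acc ys _ [y],
        ih (PySem.Set.add seen y), if_congr hiff rfl rfl, List.append_assoc]

theorem distinct2_eq_alt (l : List Int) : distinct2 l = distinct2_alt l := by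
  induction l with
  | nil => rfl
  | cons x xs ih =>
    rw [distinct2, distinct2_alt, List.reverse_cons, distinct2Loop_append_single,
      List.reverse_append]
    have hmem : (x ∈ (PySem.Set.empty : PySem.Set Int) ∨ x ∈ xs.reverse) ↔ x ∈ xs := by
      simp [PySem.Set.empty]
    rw [if_congr hmem rfl rfl]
    by_cases h : x ∈ xs
    · rw [if_pos h, if_pos h, ih, distinct2_alt]
      simp
    · rw [if_neg h, if_neg h, ih, distinct2_alt]
      simp

-- ===== VERDICT (by name: the statement is the Claim_ definition above) =====
theorem distinct2_spec : Claim_equal_distinct2 := by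
  intro l _
  exact distinct2_eq_alt l
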